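-- pv_equiv track=rewrite | github.com/SaranyaGujjula/DAA-Lab | DAA Lab-1/Part-3/3.py | find_swapped_elements
-- ===== SOURCE A (Python) =====
-- def find_swapped_elements(arr):
--     first_swapped = None
--     last_swapped = None
--
--     for i in range(len(arr) - 1):
--         if arr[i] > arr[i + 1]:
--             first_swapped = i
--             break
--
--     for i in range(len(arr) - 1, 0, -1):
--         if arr[i] < arr[i - 1]:
--             last_swapped = i
--             break
--
--     return first_swapped, last_swapped
-- ===== SOURCE B (Python) =====
-- def find_swapped_elements(arr):
--     first_swapped = None
--     last_swapped = None
--     for i in range(len(arr) - 1):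
--         if arr[i] > arr[i + 1]:
--             if first_swapped is None:
--                 first_swapped = i
--             last_swapped = i + 1
--     return first_swapped, last_swapped
-- ===== Notes on version B (the rewrite author's own statement) =====
-- stated objective: simpler
-- what changed: Replaced A's two separate scans (a forward break-loop and a backward break-loop) by one forward pass that keeps the first out-of-order index and overwrites the last one.
import Mathlib
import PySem

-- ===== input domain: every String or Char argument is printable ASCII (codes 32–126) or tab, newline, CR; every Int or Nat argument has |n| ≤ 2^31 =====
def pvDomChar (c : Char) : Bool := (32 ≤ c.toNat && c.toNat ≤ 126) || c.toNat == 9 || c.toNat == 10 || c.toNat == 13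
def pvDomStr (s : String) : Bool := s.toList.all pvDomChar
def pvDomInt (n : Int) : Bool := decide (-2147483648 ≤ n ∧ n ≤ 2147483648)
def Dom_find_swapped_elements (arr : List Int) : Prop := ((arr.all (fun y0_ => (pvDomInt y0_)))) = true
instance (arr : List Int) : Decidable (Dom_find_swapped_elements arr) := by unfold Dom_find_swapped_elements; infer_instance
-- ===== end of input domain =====

-- B replaces A's two break-loops (forward for the first index, backward for the last) by a single forward pass; objective: simpler.


-- ===== PORT A =====
-- first loop: for i in range(len(arr)-1): if arr[i] > arr[i+1]: first_swapped = i; break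
-- (indices produced by range are always in bounds, so pyGetD with default 0 is exact here)
def pvFindFirstA (arr : List Int) : List Int → Option Int
  | [] => none
  | i :: rest =>
    if PySem.List.pyGetD arr i 0 > PySem.List.pyGetD arr (i + 1) 0 then some i
    else pvFindFirstA arr rest

-- second loop: for i in range(len(arr)-1, 0, -1): if arr[i] < arr[i-1]: last_swapped = i; break
def pvFindLastA (arr : List Int) : List Int → Option Int
  | [] => none
  | i :: rest =>
    if PySem.List.pyGetD arr i 0 < PySem.List.pyGetD arr (i - 1) 0 then some i
    else pvFindLastA arr rest

def find_swapped_elements (arr : List Int) : Option Int × Option Int :=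
  (pvFindFirstA arr (PySem.List.pyRange 0 ((arr.length : Int) - 1) 1),
   pvFindLastA arr (PySem.List.pyRange ((arr.length : Int) - 1) 0 (-1)))

-- ===== PORT B =====
-- one forward pass over range(len(arr)-1) carrying (first_swapped, last_swapped)
def find_swapped_elements_alt (arr : List Int) : Option Int × Option Int :=
  (PySem.List.pyRange 0 ((arr.length : Int) - 1) 1).foldl
    (fun st i =>
      if PySem.List.pyGetD arr i 0 > PySem.List.pyGetD arr (i + 1) 0 then
        ((if st.1 = none then some i else st.1), some (i + 1))
      else st)
    (none, none)

-- ===== PRECONDITION & SPEC =====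
def Spec_find_swapped_elements (arr : List Int) (out : Option Int × Option Int) : Prop := out = find_swapped_elements_alt arr
instance (arr : List Int) (out : Option Int × Option Int) : Decidable (Spec_find_swapped_elements arr out) := by unfold Spec_find_swapped_elements; infer_instance

-- ===== CLAIM (what is proved, stated in full; the proofs are below) =====
def Claim_equal_find_swapped_elements : Prop := ∀ (arr : List Int), Dom_find_swapped_elements arr → Spec_find_swapped_elements arr (find_swapped_elements arr)

-- ===== LEMMAS AND PROOFS =====

-- "last hit" in a list of candidate indices (the value last_swapped would have, minus one)
def pvLastHit (arr : List Int) : List Int → Option Int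
  | [] => none
  | i :: rest =>
    match pvLastHit arr rest with
    | some j => some j
    | none =>
      if PySem.List.pyGetD arr i 0 > PySem.List.pyGetD arr (i + 1) 0 then some i else none

theorem pvLoopB_fst (arr : List Int) (l : List Int) (st : Option Int × Option Int) :
    (l.foldl (fun st i =>
      if PySem.List.pyGetD arr i 0 > PySem.List.pyGetD arr (i + 1) 0 then
        ((if st.1 = none then some i else st.1), some (i + 1))
      else st) st).1 =
    match st.1 with
    | some x => some x
    | none => pvFindFirstA arr l := by
  induction l generalizing st with
  | nil => cases h : st.1 <;> simp [pvFindFirstA, h]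
  | cons i rest ih =>
    simp only [List.foldl_cons, pvFindFirstA]
    obtain ⟨a, b⟩ := st
    by_cases hc : PySem.List.pyGetD arr i 0 > PySem.List.pyGetD arr (i + 1) 0 <;>
      cases a <;> simp [hc, ih]

theorem pvLoopB_snd (arr : List Int) (l : List Int) (st : Option Int × Option Int) :
    (l.foldl (fun st i =>
      if PySem.List.pyGetD arr i 0 > PySem.List.pyGetD arr (i + 1) 0 then
        ((if st.1 = none then some i else st.1), some (i + 1))
      else st) st).2 =
    match pvLastHit arr l with
    | some j => some (j + 1)
    | none => st.2 := by
  induction l generalizing st with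
  | nil => simp [pvLastHit]
  | cons i rest ih =>
    simp only [List.foldl_cons, pvLastHit]
    by_cases hc : PySem.List.pyGetD arr i 0 > PySem.List.pyGetD arr (i + 1) 0
    · cases h : pvLastHit arr rest <;> simp [hc, h, ih]
    · cases h : pvLastHit arr rest <;> simp [hc, h, ih]

theorem pvFindFirstA_append (arr : List Int) (l1 l2 : List Int) :
    pvFindFirstA arr (l1 ++ l2) =
    match pvFindFirstA arr l1 with
    | some j => some j
    | none => pvFindFirstA arr l2 := by
  induction l1 with
  | nil => simp [pvFindFirstA]
  | cons i rest ih =>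
    simp only [List.cons_append, pvFindFirstA]
    by_cases hc : PySem.List.pyGetD arr i 0 > PySem.List.pyGetD arr (i + 1) 0 <;> simp [hc, ih]

theorem pvLastHit_eq_first_reverse (arr : List Int) (l : List Int) :
    pvLastHit arr l = pvFindFirstA arr l.reverse := by
  induction l with
  | nil => simp [pvLastHit, pvFindFirstA]
  | cons i rest ih =>
    simp only [pvLastHit, List.reverse_cons, pvFindFirstA_append, ih, pvFindFirstA]

theorem pvFindLastA_map_succ (arr : List Int) (l : List Int) :
    pvFindLastA arr (l.map (fun i => i + 1)) = (pvFindFirstA arr l).map (fun i => i + 1) := by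
  induction l with
  | nil => simp [pvFindLastA, pvFindFirstA]
  | cons i rest ih =>
    simp only [List.map_cons, pvFindLastA, pvFindFirstA, add_sub_cancel_right]
    by_cases hc : PySem.List.pyGetD arr i 0 > PySem.List.pyGetD arr (i + 1) 0 <;> simp [hc, ih]

theorem pvRange_down_eq (n : Int) :
    PySem.List.pyRange (n - 1) 0 (-1) =
    ((PySem.List.pyRange 0 (n - 1) 1).reverse).map (fun i => i + 1) := by
  rw [PySem.List.pyRange_neg_one_eq_reverse, List.map_reverse]
  congr 1
  rw [PySem.List.pyRange_one, PySem.List.pyRange_one, List.map_map]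
  simp only [zero_add, sub_zero, add_sub_cancel_right]
  apply List.map_congr_left
  intro k _
  simp [add_comm]

-- ===== VERDICT (by name: the statement is the Claim_ definition above) =====
theorem find_swapped_elements_spec : Claim_equal_find_swapped_elements := by
  intro arr _
  unfold Spec_find_swapped_elements find_swapped_elements find_swapped_elements_alt
  refine Prod.ext ?_ ?_
  · rw [pvLoopB_fst]
  · rw [pvLoopB_snd, pvLastHit_eq_first_reverse, pvRange_down_eq,
      pvFindLastA_map_succ]
    cases pvFindFirstA arr (PySem.List.pyRange 0 ((arr.length : Int) - 1) 1).reverse <;> simp
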